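-- pv_equiv track=rewrite | github.com/kamal3235/practice_code | sub_array_sum.py | picking_number
-- ===== SOURCE A (Python) =====
-- def picking_number(arr):
--     arr = sorted(arr)
--     longest_subarray = 0
--     for i in range(len(arr)):
--         for j in range(len(arr)):
--             if abs(arr[i]- arr[j]) <= 1:
--                 longest_subarray = max(longest_subarray, j - i + 1)
--
--     return longest_subarray
-- ===== SOURCE B (Python) =====
-- def picking_number(arr):
--     cnt = {}
--     for x in arr:
--         cnt[x] = cnt.get(x, 0) + 1
--     best = 0
--     for v, c in cnt.items():
--         best = max(best, c + cnt.get(v + 1, 0))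
--     return best
-- ===== Notes on version B (the rewrite author's own statement) =====
-- stated objective: faster
-- what changed: Replaced sort + quadratic all-pairs scan by a single-pass frequency dictionary with max over cnt[v]+cnt[v+1].
import Mathlib
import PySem

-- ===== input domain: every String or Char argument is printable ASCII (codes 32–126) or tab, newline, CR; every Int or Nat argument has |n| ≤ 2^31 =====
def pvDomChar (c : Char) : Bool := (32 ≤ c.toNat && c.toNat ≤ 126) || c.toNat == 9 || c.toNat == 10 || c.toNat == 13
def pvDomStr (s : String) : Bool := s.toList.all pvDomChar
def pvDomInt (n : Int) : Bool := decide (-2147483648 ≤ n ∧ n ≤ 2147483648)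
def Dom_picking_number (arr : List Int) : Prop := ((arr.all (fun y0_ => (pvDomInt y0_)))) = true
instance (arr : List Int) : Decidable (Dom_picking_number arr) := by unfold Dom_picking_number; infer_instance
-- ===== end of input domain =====

-- B replaces A's sort + quadratic all-pairs scan by one frequency-dict pass and a max of cnt[v]+cnt[v+1] (asymptotically faster).

-- ===== PORT A =====
def picking_number (arr : List Int) : Int :=
  let arr2 := PySem.List.sorted arr (fun x => x) false
  let n : Int := PySem.List.len arr2
  (PySem.List.pyRange 0 n 1).foldl (fun longest i =>
    (PySem.List.pyRange 0 n 1).foldl (fun longest j =>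
      if |PySem.List.pyGetD arr2 i 0 - PySem.List.pyGetD arr2 j 0| ≤ 1 then
        max longest (j - i + 1)
      else longest) longest) 0

-- ===== PORT B =====
def picking_number_alt (arr : List Int) : Int :=
  let cnt : PySem.Dict Int Int := arr.foldl (fun d x => d.insert x (d.getD x 0 + 1)) PySem.Dict.empty
  cnt.items.foldl (fun best vc => max best (vc.2 + cnt.getD (vc.1 + 1) 0)) 0

-- ===== PRECONDITION & SPEC =====
def Spec_picking_number (arr : List Int) (out : Int) : Prop := out = picking_number_alt arr
instance (arr : List Int) (out : Int) : Decidable (Spec_picking_number arr out) := by unfold Spec_picking_number; infer_instance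

-- ===== CLAIM (what is proved, stated in full; the proofs are below) =====
def Claim_equal_picking_number : Prop := ∀ (arr : List Int), Dom_picking_number arr → Spec_picking_number arr (picking_number arr)

-- ===== LEMMAS AND PROOFS =====

/-- Characterisation of a running max of a projection. -/
theorem pv_foldl_max_char {α : Type} (f : α → Int) :
    ∀ (l : List α) (a : Int),
      a ≤ l.foldl (fun acc x => max acc (f x)) a ∧
      (∀ x ∈ l, f x ≤ l.foldl (fun acc x => max acc (f x)) a) ∧
      (l.foldl (fun acc x => max acc (f x)) a = a ∨
        ∃ x ∈ l, l.foldl (fun acc x => max acc (f x)) a = f x) := by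
  intro l
  induction l with
  | nil => simp
  | cons h t ih =>
    intro a
    simp only [List.foldl_cons]
    obtain ⟨h1, h2, h3⟩ := ih (max a (f h))
    refine ⟨le_trans (le_max_left _ _) h1, ?_, ?_⟩
    · intro x hx
      rcases List.mem_cons.1 hx with rfl | hx
      · exact le_trans (le_max_right _ _) h1
      · exact h2 x hx
    · rcases h3 with h3 | ⟨x, hx, hfx⟩
      · rcases max_choice a (f h) with hm | hm
        · exact Or.inl (h3.trans hm)
        · exact Or.inr ⟨h, List.mem_cons_self, h3.trans hm⟩
      · exact Or.inr ⟨x, List.mem_cons_of_mem _ hx, hfx⟩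

/-- Characterisation of a guarded running max (single loop). -/
theorem pv_foldl_ite_max_char (q : Int → Prop) [DecidablePred q] (g : Int → Int) :
    ∀ (l : List Int) (a : Int),
      a ≤ l.foldl (fun acc j => if q j then max acc (g j) else acc) a ∧
      (∀ j ∈ l, q j → g j ≤ l.foldl (fun acc j => if q j then max acc (g j) else acc) a) ∧
      (l.foldl (fun acc j => if q j then max acc (g j) else acc) a = a ∨
        ∃ j ∈ l, q j ∧ l.foldl (fun acc j => if q j then max acc (g j) else acc) a = g j) := by
  intro l
  induction l with
  | nil => simp
  | cons h t ih =>
    intro a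
    simp only [List.foldl_cons]
    by_cases hq : q h
    · simp only [if_pos hq]
      obtain ⟨h1, h2, h3⟩ := ih (max a (g h))
      refine ⟨le_trans (le_max_left _ _) h1, ?_, ?_⟩
      · intro j hj hqj
        rcases List.mem_cons.1 hj with rfl | hj
        · exact le_trans (le_max_right _ _) h1
        · exact h2 j hj hqj
      · rcases h3 with h3 | ⟨j, hj, hqj, hgj⟩
        · rcases max_choice a (g h) with hm | hm
          · exact Or.inl (h3.trans hm)
          · exact Or.inr ⟨h, List.mem_cons_self, hq, h3.trans hm⟩
        · exact Or.inr ⟨j, List.mem_cons_of_mem _ hj, hqj, hgj⟩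
    · simp only [if_neg hq]
      obtain ⟨h1, h2, h3⟩ := ih a
      refine ⟨h1, ?_, ?_⟩
      · intro j hj hqj
        rcases List.mem_cons.1 hj with rfl | hj
        · exact absurd hqj hq
        · exact h2 j hj hqj
      · rcases h3 with h3 | ⟨j, hj, hqj, hgj⟩
        · exact Or.inl h3
        · exact Or.inr ⟨j, List.mem_cons_of_mem _ hj, hqj, hgj⟩

/-- Characterisation of a guarded running max over two nested loops. -/
theorem pv_foldl2_ite_max_char (p : Int → Int → Prop) [∀ i j, Decidable (p i j)]
    (f : Int → Int → Int) (l l' : List Int) :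
    ∀ (a : Int),
      a ≤ l.foldl (fun acc i => l'.foldl (fun acc j => if p i j then max acc (f i j) else acc) acc) a ∧
      (∀ i ∈ l, ∀ j ∈ l', p i j →
        f i j ≤ l.foldl (fun acc i => l'.foldl (fun acc j => if p i j then max acc (f i j) else acc) acc) a) ∧
      (l.foldl (fun acc i => l'.foldl (fun acc j => if p i j then max acc (f i j) else acc) acc) a = a ∨
        ∃ i ∈ l, ∃ j ∈ l', p i j ∧
          l.foldl (fun acc i => l'.foldl (fun acc j => if p i j then max acc (f i j) else acc) acc) a = f i j) := by
  induction l with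
  | nil => simp
  | cons h t ih =>
    intro a
    simp only [List.foldl_cons]
    obtain ⟨s1, s2, s3⟩ := pv_foldl_ite_max_char (p h) (f h) l' a
    obtain ⟨h1, h2, h3⟩ := ih (l'.foldl (fun acc j => if p h j then max acc (f h j) else acc) a)
    refine ⟨le_trans s1 h1, ?_, ?_⟩
    · intro i hi j hj hpij
      rcases List.mem_cons.1 hi with rfl | hi
      · exact le_trans (s2 j hj hpij) h1
      · exact h2 i hi j hj hpij
    · rcases h3 with h3 | ⟨i, hi, j, hj, hpij, hfe⟩
      · rcases s3 with s3 | ⟨j, hj, hqj, hgj⟩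
        · exact Or.inl (h3.trans s3)
        · exact Or.inr ⟨h, List.mem_cons_self, j, hj, hqj, h3.trans hgj⟩
      · exact Or.inr ⟨i, List.mem_cons_of_mem _ hi, j, hj, hpij, hfe⟩

/-- Counting an interval {v, v+1} of integers is counting v plus counting v+1. -/
theorem pv_countP_interval (v : Int) :
    ∀ l : List Int, l.countP (fun x => decide (v ≤ x ∧ x ≤ v + 1)) = l.count v + l.count (v + 1) := by
  intro l
  induction l with
  | nil => simp
  | cons h t ih =>
    simp only [List.countP_cons, List.count_cons, ih]
    by_cases h1 : h = v <;> by_cases h2 : h = v + 1 <;> simp [h1, h2] <;> omega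

/-- In a sorted list, if p is false on some element it is false on all later ones. -/
theorem pv_dropWhile_all_false (p : Int → Bool)
    (hp : ∀ x y : Int, p x = false → x ≤ y → p y = false) :
    ∀ s : List Int, s.Pairwise (fun a b => a ≤ b) → ∀ x ∈ s.dropWhile p, p x = false := by
  intro s
  induction s with
  | nil => simp
  | cons h t ih =>
    intro hpair x hx
    rcases List.pairwise_cons.1 hpair with ⟨hht, ht⟩
    by_cases hph : p h = true
    · rw [List.dropWhile_cons_of_pos hph] at hx
      exact ih ht x hx
    · have hph' : p h = false := Bool.eq_false_iff.2 hph
      rw [List.dropWhile_cons_of_neg hph] at hx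
      rcases List.mem_cons.1 hx with rfl | hx
      · exact hph'
      · exact hp h x hph' (hht x hx)

/-- A window of a sorted list whose endpoints differ by ≤ 1 is no longer than the count of {v,v+1}. -/
theorem pv_window_le_countP (s : List Int) (hs : s.Pairwise (fun a b => a ≤ b)) (i j : Nat)
    (hij : i ≤ j) (hj : j < s.length)
    (hd : s[j] - s[i]'(lt_of_le_of_lt hij hj) ≤ 1) :
    (j : Int) - (i : Int) + 1 ≤
      (s.countP (fun x => decide (s[i]'(lt_of_le_of_lt hij hj) ≤ x ∧
        x ≤ s[i]'(lt_of_le_of_lt hij hj) + 1)) : Int) := by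
  have hi : i < s.length := lt_of_le_of_lt hij hj
  have hmono : ∀ (p q : Nat) (hp : p < s.length) (hq : q < s.length), p ≤ q → s[p] ≤ s[q] := by
    intro p q hp hq hpq
    rcases Nat.lt_or_ge p q with hlt | hge
    · exact (List.pairwise_iff_getElem.1 hs) p q hp hq hlt
    · have : p = q := le_antisymm hpq hge
      subst this; exact le_refl _
  set P : Int → Bool := fun x => decide (s[i] ≤ x ∧ x ≤ s[i] + 1) with hP
  set seg := (s.drop i).take (j - i + 1) with hseg
  have hlen : seg.length = j - i + 1 := by
    simp only [hseg, List.length_take, List.length_drop]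
    omega
  have hsub : seg.Sublist s := (List.take_sublist _ _).trans (List.drop_sublist _ _)
  have hall : ∀ x ∈ seg, P x = true := by
    intro x hx
    obtain ⟨m, hm, hxm⟩ := List.getElem_of_mem hx
    have hm' : m < j - i + 1 := by omega
    have hidx : i + m < s.length := by omega
    have hxv : x = s[i + m] := by
      rw [← hxm]
      simp only [hseg]
      rw [List.getElem_take, List.getElem_drop]
    have hlo : s[i] ≤ s[i + m] := hmono i (i + m) hi hidx (by omega)
    have hhi : s[i + m] ≤ s[j] := hmono (i + m) j hidx hj (by omega)
    simp only [hP, hxv, decide_eq_true_eq]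
    constructor
    · exact hlo
    · omega
  have h1 : seg.countP P = seg.length := List.countP_eq_length.2 hall
  have h2 : seg.countP P ≤ s.countP P := hsub.countP_le
  have : (j - i + 1 : Nat) ≤ s.countP P := by omega
  omega

/-- In a sorted list containing v, some window realises the full count of {v,v+1}. -/
theorem pv_exists_window (s : List Int) (hs : s.Pairwise (fun a b => a ≤ b)) (v : Int) (hv : v ∈ s) :
    ∃ (i j : Nat) (hi : i < s.length) (hj : j < s.length), i ≤ j ∧
      (v ≤ s[i] ∧ s[i] ≤ v + 1) ∧ (v ≤ s[j] ∧ s[j] ≤ v + 1) ∧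
      (j : Int) - (i : Int) + 1 = (s.countP (fun x => decide (v ≤ x ∧ x ≤ v + 1)) : Int) := by
  set P : Int → Bool := fun x => decide (v ≤ x ∧ x ≤ v + 1) with hP
  set p1 : Int → Bool := fun x => decide (x < v) with hp1
  set p2 : Int → Bool := fun x => decide (x ≤ v + 1) with hp2
  set a := s.takeWhile p1 with ha
  set rest := s.dropWhile p1 with hrest
  set b := rest.takeWhile p2 with hb
  set c := rest.dropWhile p2 with hc
  have hsplit1 : s = a ++ rest := (List.takeWhile_append_dropWhile).symm
  have hsplit2 : rest = b ++ c := (List.takeWhile_append_dropWhile).symm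
  have hrest_ge : ∀ x ∈ rest, v ≤ x := by
    intro x hx
    have := pv_dropWhile_all_false p1
      (by intro x y hxf hxy; simp only [hp1, decide_eq_false_iff_not, not_lt] at *; omega)
      s hs x hx
    simp only [hp1, decide_eq_false_iff_not, not_lt] at this
    exact this
  have hrest_pw : rest.Pairwise (fun x y => x ≤ y) := hs.sublist (List.dropWhile_sublist _)
  have hb_mem : ∀ x ∈ b, v ≤ x ∧ x ≤ v + 1 := by
    intro x hx
    refine ⟨hrest_ge x ((List.takeWhile_sublist _).subset hx), ?_⟩
    have := List.mem_takeWhile_imp hx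
    simpa [hp2] using this
  have hc_mem : ∀ x ∈ c, v + 1 < x := by
    intro x hx
    have := pv_dropWhile_all_false p2
      (by intro x y hxf hxy; simp only [hp2, decide_eq_false_iff_not, not_le] at *; omega)
      rest hrest_pw x hx
    simpa [hp2] using this
  have ha_mem : ∀ x ∈ a, x < v := by
    intro x hx
    have := List.mem_takeWhile_imp hx
    simpa [hp1] using this
  have hcount : s.countP P = b.length := by
    rw [hsplit1, hsplit2, List.countP_append, List.countP_append]
    have h1 : a.countP P = 0 := by
      rw [List.countP_eq_zero]
      intro x hx
      have := ha_mem x hx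
      simp only [hP, decide_eq_true_eq]
      omega
    have h2 : b.countP P = b.length := by
      apply List.countP_eq_length.2
      intro x hx
      have := hb_mem x hx
      simp only [hP, decide_eq_true_eq]
      omega
    have h3 : c.countP P = 0 := by
      rw [List.countP_eq_zero]
      intro x hx
      have := hc_mem x hx
      simp only [hP, decide_eq_true_eq]
      omega
    omega
  have hbne : 1 ≤ b.length := by
    have hpos : 0 < s.countP P := List.countP_pos_iff.2 ⟨v, hv, by simp [hP]⟩
    omega
  have hslen : s.length = a.length + b.length + c.length := by
    rw [hsplit1, hsplit2]; simp; omega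
  refine ⟨a.length, a.length + (b.length - 1), by omega, by omega, by omega, ?_, ?_, by
    rw [hcount]; omega⟩
  · have hidx : s[a.length]'(by omega) = b[0]'(by omega) := by
      have e1 : s[a.length]'(by omega) = (a ++ (b ++ c))[a.length]'(by
          rw [← hsplit2, ← hsplit1]; omega) :=
        List.getElem_of_eq (by rw [hsplit1, hsplit2]) _
      rw [e1, List.getElem_append_right (le_refl a.length),
        List.getElem_append_left (by omega)]
      simp
    rw [hidx]
    exact hb_mem _ (List.getElem_mem _)
  · have hidx : s[a.length + (b.length - 1)]'(by omega) = b[b.length - 1]'(by omega) := by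
      have e1 : s[a.length + (b.length - 1)]'(by omega) = (a ++ (b ++ c))[a.length + (b.length - 1)]'(by
          rw [← hsplit2, ← hsplit1]; omega) :=
        List.getElem_of_eq (by rw [hsplit1, hsplit2]) _
      rw [e1, List.getElem_append_right (by omega : a.length ≤ a.length + (b.length - 1)),
        List.getElem_append_left (by omega)]
      congr 1
      omega
    rw [hidx]
    exact hb_mem _ (List.getElem_mem _)

theorem pv_main (arr : List Int) : picking_number arr = picking_number_alt arr := by
  set s := PySem.List.sorted arr (fun x => x) false with hsdef
  have hperm : s.Perm arr := PySem.List.sorted_perm arr (fun x => x) false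
  have hs : s.Pairwise (fun a b => a ≤ b) := by
    simpa using PySem.List.sorted_pairwise arr (fun x => x)
  have hA : picking_number arr
      = (PySem.List.pyRange 0 (s.length : Int) 1).foldl (fun acc i =>
          (PySem.List.pyRange 0 (s.length : Int) 1).foldl (fun acc j =>
            if |PySem.List.pyGetD s i 0 - PySem.List.pyGetD s j 0| ≤ 1 then
              max acc (j - i + 1)
            else acc) acc) 0 := by
    simp only [picking_number, PySem.List.len_eq, hsdef]
  have hB : picking_number_alt arr
      = (PySem.Set.ofList arr).foldl (fun best v =>
          max best ((arr.count v : Int) + (arr.count (v + 1) : Int))) 0 := by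
    show ((PySem.Dict.counter arr).items).foldl
        (fun best vc => max best (vc.2 + (PySem.Dict.counter arr).getD (vc.1 + 1) 0)) 0 = _
    rw [PySem.Dict.items_counter, List.foldl_map]
    simp only [PySem.Dict.getD_counter]
  obtain ⟨A1, A2, A3⟩ := pv_foldl2_ite_max_char
    (fun i j => |PySem.List.pyGetD s i 0 - PySem.List.pyGetD s j 0| ≤ 1)
    (fun i j => j - i + 1)
    (PySem.List.pyRange 0 (s.length : Int) 1) (PySem.List.pyRange 0 (s.length : Int) 1) 0
  obtain ⟨B1, B2, B3⟩ := pv_foldl_max_char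
    (fun v => (arr.count v : Int) + (arr.count (v + 1) : Int)) (PySem.Set.ofList arr) 0
  rw [hA, hB]
  apply le_antisymm
  · rcases A3 with h0 | ⟨i, hi, j, hj, hp, he⟩
    · rw [h0]; exact B1
    · rw [he]
      obtain ⟨hi0, hin⟩ := PySem.List.mem_pyRange_one.1 hi
      obtain ⟨hj0, hjn⟩ := PySem.List.mem_pyRange_one.1 hj
      rcases lt_or_ge j i with hlt | hge
      · calc j - i + 1 ≤ 0 := by omega
          _ ≤ _ := B1
      · have hni : i.toNat < s.length := by omega
        have hnj : j.toNat < s.length := by omega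
        have hij : i.toNat ≤ j.toNat := by omega
        have hgi : PySem.List.pyGetD s i 0 = s[i.toNat] :=
          PySem.List.pyGetD_eq_getElem s 0 hi0 (by simpa using hin)
        have hgj : PySem.List.pyGetD s j 0 = s[j.toNat] :=
          PySem.List.pyGetD_eq_getElem s 0 hj0 (by simpa using hjn)
        rw [hgi, hgj] at hp
        have hd : s[j.toNat] - s[i.toNat]'hni ≤ 1 := by
          have := abs_le.1 hp
          omega
        have key := pv_window_le_countP s hs i.toNat j.toNat hij hnj hd
        set v := s[i.toNat]'hni with hvdef
        have hvmem : v ∈ arr := hperm.subset (List.getElem_mem hni)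
        have hcnt : s.countP (fun x => decide (v ≤ x ∧ x ≤ v + 1))
            = arr.count v + arr.count (v + 1) := by
          rw [hperm.countP_eq, pv_countP_interval]
        have hble := B2 v ((PySem.Set.mem_ofList _ _).2 hvmem)
        rw [hcnt] at key
        have hcast : (j : Int) - i + 1 = (j.toNat : Int) - (i.toNat : Int) + 1 := by omega
        rw [hcast]
        calc ((j.toNat : Int) - i.toNat + 1)
            ≤ ((arr.count v + arr.count (v + 1) : Nat) : Int) := key
          _ = (arr.count v : Int) + (arr.count (v + 1) : Int) := by push_cast; ring
          _ ≤ _ := hble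
  · rcases B3 with h0 | ⟨v, hv, he⟩
    · rw [h0]; exact A1
    · rw [he]
      have hvarr : v ∈ arr := (PySem.Set.mem_ofList _ _).1 hv
      have hvs : v ∈ s := hperm.mem_iff.2 hvarr
      obtain ⟨i, j, hi, hj, hij, ⟨hvi1, hvi2⟩, ⟨hvj1, hvj2⟩, hcnt⟩ := pv_exists_window s hs v hvs
      have hmi : (i : Int) ∈ PySem.List.pyRange 0 (s.length : Int) 1 :=
        PySem.List.mem_pyRange_one.2 ⟨by omega, by exact_mod_cast hi⟩
      have hmj : (j : Int) ∈ PySem.List.pyRange 0 (s.length : Int) 1 :=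
        PySem.List.mem_pyRange_one.2 ⟨by omega, by exact_mod_cast hj⟩
      have hgi : PySem.List.pyGetD s (i : Int) 0 = s[i] := by
        rw [PySem.List.pyGetD_eq_getElem s (i := (i : Int)) 0 (by omega) (by exact_mod_cast hi)]
        simp
      have hgj : PySem.List.pyGetD s (j : Int) 0 = s[j] := by
        rw [PySem.List.pyGetD_eq_getElem s (i := (j : Int)) 0 (by omega) (by exact_mod_cast hj)]
        simp
      have hp : |PySem.List.pyGetD s (i : Int) 0 - PySem.List.pyGetD s (j : Int) 0| ≤ 1 := by
        rw [hgi, hgj, abs_le]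
        omega
      have hle := A2 (i : Int) hmi (j : Int) hmj hp
      have hcnt' : s.countP (fun x => decide (v ≤ x ∧ x ≤ v + 1))
          = arr.count v + arr.count (v + 1) := by
        rw [hperm.countP_eq, pv_countP_interval]
      rw [hcnt'] at hcnt
      have : (arr.count v : Int) + (arr.count (v + 1) : Int)
          = (j : Int) - (i : Int) + 1 := by
        rw [hcnt]; push_cast; ring
      rw [this]
      exact hle

-- ===== VERDICT (by name: the statement is the Claim_ definition above) =====
theorem picking_number_spec : Claim_equal_picking_number := by
  intro arr _
  unfold Spec_picking_number
  exact pv_main arr
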